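-- pv_equiv track=rewrite | github.com/mathiashatlestad/aoc2024 | 2024/09_disk_fragmenter/aoc202409.py | find_first_empty_element
-- ===== SOURCE A (Python) =====
-- def find_first_empty_element(l, start_index, require_size_in_a_row):
--     consecutive_count = 0
--     for index in range(start_index, len(l)):
--         if l[index] < 0:
--             consecutive_count += 1
--             if consecutive_count == require_size_in_a_row:
--                 return index + 1 - require_size_in_a_row
--         else:
--             consecutive_count = 0  # Reset the count if the sequence is broken
--
--     return None
-- ===== SOURCE B (Python) =====
-- def find_first_empty_element(l, start_index, require_size_in_a_row):
--     s = ''.join('E' if x < 0 else '.' for x in l[start_index:])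
--     if require_size_in_a_row <= 0 or require_size_in_a_row > len(s):
--         return None
--     pos = s.find('E' * require_size_in_a_row)
--     return None if pos == -1 else pos + start_index
-- ===== Notes on version B (the rewrite author's own statement) =====
-- stated objective: idiomatic
-- what changed: Replaced A's running-consecutive-count state machine over range(start,len) with building a sign string ('E' for negative) from l[start_index:] and locating the run via str.find('E'*n) (after a can't-fit guard), returning the found position plus the offset.
-- outside the precondition, e.g. on find_first_empty_element([-1, 5], -1, 1): A returns 0, B returns None; on find_first_empty_element([1, 2], -5, 1): A raises IndexError, B returns None
import Mathlib
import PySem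

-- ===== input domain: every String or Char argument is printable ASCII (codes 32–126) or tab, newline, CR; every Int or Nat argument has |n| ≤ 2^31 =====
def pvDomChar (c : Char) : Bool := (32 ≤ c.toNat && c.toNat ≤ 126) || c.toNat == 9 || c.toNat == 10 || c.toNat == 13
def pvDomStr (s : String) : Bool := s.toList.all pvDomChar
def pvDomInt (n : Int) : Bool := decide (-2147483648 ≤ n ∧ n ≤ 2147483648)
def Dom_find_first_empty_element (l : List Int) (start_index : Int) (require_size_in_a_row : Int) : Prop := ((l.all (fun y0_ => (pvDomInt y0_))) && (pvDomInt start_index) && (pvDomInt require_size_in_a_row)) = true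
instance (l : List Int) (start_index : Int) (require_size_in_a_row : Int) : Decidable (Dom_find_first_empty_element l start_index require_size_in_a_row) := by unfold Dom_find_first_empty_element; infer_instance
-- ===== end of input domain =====

-- B replaces A's running-consecutive-count state machine with a substring search ('E'*n in a derived sign string) — an idiomatic re-implementation; proved equal for 0 ≤ start_index.

-- ===== PORT A =====
-- A's for-loop (early return) as structural recursion over the range list; pyGet? none (IndexError,
-- reachable only when start_index < -len l, outside Pre_) is rendered as none.
def ffeLoop (l : List Int) (require : Int) : List Int → Int → Option Int
  | [], _ => none
  | i :: rest, cc =>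
    match PySem.List.pyGet? l i with
    | none => none
    | some v =>
      if v < 0 then
        if cc + 1 = require then some (i + 1 - require)
        else ffeLoop l require rest (cc + 1)
      else ffeLoop l require rest 0

def find_first_empty_element (l : List Int) (start_index : Int) (require_size_in_a_row : Int) : Option Int :=
  ffeLoop l require_size_in_a_row (PySem.List.pyRange start_index ((l.length : Int)) 1) 0

-- ===== PORT B =====
def pvSign (x : Int) : Char := if x < 0 then 'E' else '.'

def find_first_empty_element_alt (l : List Int) (start_index : Int) (require_size_in_a_row : Int) : Option Int :=
  let s : List Char := (PySem.List.slice l (some start_index) none).map pvSign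
  if require_size_in_a_row ≤ 0 ∨ (s.length : Int) < require_size_in_a_row then none
  else
    let pos : Int := PySem.Chars.find s (List.replicate require_size_in_a_row.toNat 'E')
    if pos = -1 then none else some (pos + start_index)

-- ===== PRECONDITION & SPEC =====
-- Pre_ excludes negative start_index: there A's negative-index wraparound re-scans the trailing
-- elements and then the whole list (raising IndexError once start_index < -len(l)), while B reads the
-- slice l[start_index:] as a from-the-end offset; both are defensible readings of an unspecified corner.
def Pre_find_first_empty_element (l : List Int) (start_index : Int) (require_size_in_a_row : Int) : Prop := 0 ≤ start_index
instance (l : List Int) (start_index : Int) (require_size_in_a_row : Int) : Decidable (Pre_find_first_empty_element l start_index require_size_in_a_row) := by unfold Pre_find_first_empty_element; infer_instance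

def pvWitness_find_first_empty_element : List Int × Int × Int := ([1, -1, -2, 3], 0, 2)

def Spec_find_first_empty_element (l : List Int) (start_index : Int) (require_size_in_a_row : Int) (out : Option Int) : Prop := out = find_first_empty_element_alt l start_index require_size_in_a_row
instance (l : List Int) (start_index : Int) (require_size_in_a_row : Int) (out : Option Int) : Decidable (Spec_find_first_empty_element l start_index require_size_in_a_row out) := by unfold Spec_find_first_empty_element; infer_instance

-- ===== CLAIM (what is proved, stated in full; the proofs are below) =====
def Claim_equal_find_first_empty_element : Prop := ∀ (l : List Int) (start_index : Int) (require_size_in_a_row : Int), Dom_find_first_empty_element l start_index require_size_in_a_row → Pre_find_first_empty_element l start_index require_size_in_a_row → Spec_find_first_empty_element l start_index require_size_in_a_row (find_first_empty_element l start_index require_size_in_a_row)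

-- ===== LEMMAS AND PROOFS =====

-- Proof-side restatement of A's loop over the values of l.drop k (position offset i, running count cc).
def loopT (require : Int) : List Int → Int → Int → Option Int
  | [], _, _ => none
  | v :: rest, i, cc =>
    if v < 0 then
      if cc + 1 = require then some (i + 1 - require)
      else loopT require rest (i + 1) (cc + 1)
    else loopT require rest (i + 1) 0

-- First position p with pat a prefix of s.drop p (reference form of Python's str.find).
def findRun? (pat : List Char) : List Char → Option Nat
  | [] => if pat = [] then some 0 else none
  | c :: s => if pat <+: (c :: s) then some 0 else (findRun? pat s).map (· + 1)

theorem loopT_none_of_nonpos (r : Int) (hr : r ≤ 0) :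
    ∀ (xs : List Int) (a cc : Int), 0 ≤ cc → loopT r xs a cc = none := by
  intro xs
  induction xs with
  | nil => intro a cc _; simp [loopT]
  | cons v rest ih =>
    intro a cc hcc
    simp only [loopT]
    split_ifs with h1 h2
    · omega
    · exact ih (a + 1) (cc + 1) (by omega)
    · exact ih (a + 1) 0 le_rfl

theorem ffeLoop_eq_loopT (l : List Int) (r : Int) :
    ∀ (k : Nat) (cc : Int),
      ffeLoop l r (PySem.List.pyRange (k : Int) ((l.length : Int)) 1) cc
        = loopT r (l.drop k) (k : Int) cc := by
  intro k
  induction hk : l.length - k using Nat.strong_induction_on generalizing k with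
  | _ n ih =>
    intro cc
    by_cases hlt : k < l.length
    · rw [PySem.List.pyRange_one_cons (by exact_mod_cast hlt),
        List.drop_eq_getElem_cons hlt]
      simp only [ffeLoop, loopT, PySem.List.pyGet?_natCast, List.getElem?_eq_getElem hlt]
      have hx : ((k : Int) + 1) = ((k + 1 : Nat) : Int) := by push_cast; ring
      split_ifs with h1 h2
      · rfl
      · rw [hx, ih (l.length - (k+1)) (by omega) (k+1) rfl]
      · rw [hx, ih (l.length - (k+1)) (by omega) (k+1) rfl]
    · rw [PySem.List.pyRange_one_eq_nil (by exact_mod_cast Nat.le_of_not_lt hlt),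
        List.drop_of_length_le (Nat.le_of_not_lt hlt)]
      simp [ffeLoop, loopT]

theorem findRun?_eq_none_iff (pat : List Char) :
    ∀ s : List Char, findRun? pat s = none ↔ ∀ j, ¬ pat <+: s.drop j := by
  intro s
  induction s with
  | nil =>
    simp only [findRun?, List.drop_nil]
    constructor
    · intro h j hp
      by_cases hpat : pat = [] <;> simp [hpat] at h hp
    · intro h
      have := h 0
      have hpat : pat ≠ [] := by rintro rfl; exact this List.nil_prefix
      simp [hpat]
  | cons c s ih =>
    simp only [findRun?]
    constructor
    · intro h j
      split_ifs at h with hp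
      cases j with
        | zero => simpa using hp
        | succ j =>
          simp only [List.drop_succ_cons]
          exact (ih.mp (by simpa using h)) j
    · intro h
      have h0 := h 0
      simp only [List.drop_zero] at h0
      rw [if_neg h0]
      simp only [Option.map_eq_none_iff]
      exact ih.mpr (fun j => by simpa using h (j + 1))

theorem findRun?_spec (pat : List Char) :
    ∀ (s : List Char) (p : Nat), findRun? pat s = some p →
      pat <+: s.drop p ∧ ∀ i < p, ¬ pat <+: s.drop i := by
  intro s
  induction s with
  | nil =>
    intro p h
    simp only [findRun?] at h
    split_ifs at h with hpat
    obtain rfl : 0 = p := by simpa using h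
    subst hpat; simp
  | cons c s ih =>
    intro p h
    simp only [findRun?] at h
    split_ifs at h with hp
    · cases h; exact ⟨hp, by omega⟩
    · simp only [Option.map_eq_some_iff] at h
      obtain ⟨q, hq, rfl⟩ := h
      obtain ⟨h1, h2⟩ := ih q hq
      refine ⟨by simpa using h1, ?_⟩
      intro i hi
      cases i with
      | zero => simpa using hp
      | succ i => simpa using h2 i (by omega)

theorem not_prefix_run (rn cn : Nat) (h : cn < rn) (s : List Char) :
    ¬ (List.replicate rn 'E' <+: List.replicate cn 'E' ++ '.' :: s) := by
  intro hp
  have hlen : cn < (List.replicate rn 'E').length := by simpa using h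
  have hg := hp.getElem hlen
  rw [List.getElem_replicate, List.getElem_append_right (by simp)] at hg
  simp at hg

theorem findRun?_skip (rn : Nat) :
    ∀ (cn : Nat), cn < rn → ∀ s : List Char,
      findRun? (List.replicate rn 'E') (List.replicate cn 'E' ++ '.' :: s)
        = (findRun? (List.replicate rn 'E') s).map (· + (cn + 1)) := by
  intro cn
  induction cn with
  | zero =>
    intro h s
    simp only [List.replicate_zero, List.nil_append, findRun?]
    rw [if_neg (by simpa using not_prefix_run rn 0 h s)]
  | succ cn ih =>
    intro h s
    rw [List.replicate_succ, List.cons_append]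
    simp only [findRun?]
    rw [if_neg (by rw [← List.cons_append, ← List.replicate_succ]; exact not_prefix_run rn (cn+1) h s)]
    rw [ih (by omega) s, Option.map_map]
    rfl

theorem findRun?_replicate_lt (rn cn : Nat) (h : cn < rn) :
    findRun? (List.replicate rn 'E') (List.replicate cn 'E') = none := by
  rw [findRun?_eq_none_iff]
  intro j hp
  have := hp.length_le
  simp [List.drop_replicate] at this
  omega

theorem findRun?_self (pat : List Char) (hpat : pat ≠ []) (t : List Char) :
    findRun? pat (pat ++ t) = some 0 := by
  obtain ⟨c, p', rfl⟩ := List.exists_cons_of_ne_nil hpat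
  simp only [List.cons_append, findRun?]
  rw [if_pos (by simp only [← List.cons_append]; exact (c :: p').prefix_append t)]

theorem loopT_eq_findRun (r : Int) (hr : 1 ≤ r) :
    ∀ (xs : List Int) (a cc : Int), 0 ≤ cc → cc < r →
      loopT r xs a cc
        = (findRun? (List.replicate r.toNat 'E')
            (List.replicate cc.toNat 'E' ++ xs.map pvSign)).map (fun p : Nat => (a - cc + (p : Int) : Int)) := by
  intro xs
  induction xs with
  | nil =>
    intro a cc h0 hlt
    simp only [List.map_nil, List.append_nil, loopT]
    rw [findRun?_replicate_lt r.toNat cc.toNat (by omega)]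
    rfl
  | cons v rest ih =>
    intro a cc h0 hlt
    simp only [loopT, List.map_cons]
    by_cases hv : v < 0
    · rw [if_pos hv]
      have hsign : pvSign v = 'E' := by simp [pvSign, hv]
      rw [hsign]
      have hlist : List.replicate cc.toNat 'E' ++ 'E' :: rest.map pvSign
          = List.replicate (cc + 1).toNat 'E' ++ rest.map pvSign := by
        have hcc1 : (cc + 1).toNat = cc.toNat + 1 := by omega
        rw [hcc1, List.replicate_succ']
        simp
      by_cases he : cc + 1 = r
      · rw [if_pos he, hlist]
        have hrep : List.replicate (cc + 1).toNat 'E' = List.replicate r.toNat 'E' := by rw [he]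
        rw [hrep, findRun?_self _ (by simp; omega) _]
        simp only [Option.map_some, Nat.cast_zero]
        congr 1
        omega
      · rw [if_neg he, hlist, ih (a + 1) (cc + 1) (by omega) (by omega)]
        congr 1
        funext p
        ring
    · rw [if_neg hv]
      have hsign : pvSign v = '.' := by simp [pvSign, hv]
      rw [hsign, ih (a + 1) 0 le_rfl (by omega),
        findRun?_skip r.toNat cc.toNat (by omega) (rest.map pvSign), Option.map_map]
      simp only [Int.toNat_zero, List.replicate_zero, List.nil_append]
      congr 1
      funext p
      simp only [Function.comp_apply]
      have : ((cc.toNat : Int)) = cc := Int.toNat_of_nonneg h0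
      push_cast
      omega

theorem findRun?_eq_none_of_length (pat s : List Char) (hl : s.length < pat.length) :
    findRun? pat s = none := by
  rw [findRun?_eq_none_iff]
  intro j hp
  have := hp.length_le
  simp only [List.length_drop] at this
  omega

theorem find_eq_findRun (pat s : List Char) (_hpat : pat ≠ []) :
    PySem.Chars.find s pat = (match findRun? pat s with | none => -1 | some p => (p : Int)) := by
  cases h : findRun? pat s with
  | none =>
    have hnp : ∀ j, ¬ pat <+: s.drop j := (findRun?_eq_none_iff pat s).mp h
    have hni : ¬ pat <:+: s := by
      intro hin
      obtain ⟨j, hj⟩ := (PySem.Chars.exists_prefix_drop_iff_isIn pat s).mpr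
        ((PySem.Chars.isIn_iff_infix pat s).mpr hin)
      exact hnp j hj
    simp only [(PySem.Chars.find_eq_neg_one_iff s pat).mpr hni]
  | some p =>
    obtain ⟨hpre, hmin⟩ := findRun?_spec pat s p h
    have hin : pat <:+: s := hpre.isInfix.trans (List.drop_suffix p s).isInfix
    have hnn : 0 ≤ PySem.Chars.find s pat := (PySem.Chars.find_nonneg_iff s pat).mpr hin
    obtain ⟨hp1, hp2⟩ := PySem.Chars.find_spec hnn
    have h1 : ¬ (PySem.Chars.find s pat).toNat < p := fun hlt => hmin _ hlt hp1
    have h2 : ¬ p < (PySem.Chars.find s pat).toNat := fun hlt => hp2 p hlt hpre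
    simp only []
    omega

-- ===== VERDICT (by name: the statement is the Claim_ definition above) =====
theorem find_first_empty_element_spec : Claim_equal_find_first_empty_element := by
  intro l a r _hd hpre
  unfold Spec_find_first_empty_element find_first_empty_element find_first_empty_element_alt
  obtain ⟨k, rfl⟩ : ∃ k : Nat, ((k : Int)) = a := ⟨a.toNat, Int.toNat_of_nonneg hpre⟩
  simp only [PySem.List.slice_from l (Int.natCast_nonneg k), Int.toNat_natCast]
  by_cases hr : r ≤ 0
  · rw [if_pos (Or.inl hr), ffeLoop_eq_loopT l r k 0, loopT_none_of_nonpos r hr _ _ 0 le_rfl]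
  · rw [ffeLoop_eq_loopT l r k 0,
      loopT_eq_findRun r (by omega) (l.drop k) ((k : Int)) 0 le_rfl (by omega)]
    simp only [Int.toNat_zero, List.replicate_zero, List.nil_append]
    by_cases hlen : ((((l.drop k).map pvSign).length : Nat) : Int) < r
    · rw [if_pos (Or.inr hlen)]
      rw [findRun?_eq_none_of_length _ _ (by simp only [List.length_replicate] at hlen ⊢; omega)]
      rfl
    · rw [if_neg (not_or.mpr ⟨hr, hlen⟩)]
      have hpat : (List.replicate r.toNat 'E' : List Char) ≠ [] := by simp; omega
      rw [find_eq_findRun _ _ hpat]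
      cases h : findRun? (List.replicate r.toNat 'E') ((l.drop k).map pvSign) with
      | none => simp
      | some p =>
        simp only [Option.map_some]
        rw [if_neg (show ¬((p : Nat) : Int) = -1 by omega)]
        congr 1
        omega
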